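-- pv_equiv track=rewrite | github.com/strands-agents/sdk-python | src/strands/vended_tools/shell.py | _safe_yield_length
-- ===== SOURCE A (Python) =====
-- def _safe_yield_length(buffer: str, marker: str) -> int:
--     """Return the number of chars from the start of buffer that are safe to yield.
--
--     "Safe" means: no suffix of the yielded portion could be a prefix of the marker.
--     This prevents partial marker leakage when the marker is split across chunks.
--     """
--     # Check if the buffer contains the full marker — if so, only yield up to it
--     marker_pos = buffer.find(marker)
--     if marker_pos != -1:
--         return marker_pos
--
--     # Check if the end of the buffer matches a prefix of the marker.
--     # e.g., buffer ends with "__STRAN" which is a prefix of "__STRANDS_CWD__"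
--     max_overlap = min(len(marker) - 1, len(buffer))
--     for i in range(max_overlap, 0, -1):
--         if buffer.endswith(marker[:i]):
--             return len(buffer) - i
--
--     # No overlap — everything is safe
--     return len(buffer)
-- ===== SOURCE B (Python) =====
-- def _safe_yield_length(buffer: str, marker: str) -> int:
--     # Earliest split point p such that the remainder buffer[p:] is "aligned"
--     # with the marker: either the marker starts there, or the remainder is a
--     # prefix of the marker (possibly empty).
--     for p in range(len(buffer)):
--         tail = buffer[p:]
--         if tail.startswith(marker) or marker.startswith(tail):
--             return p
--     return len(buffer)
-- ===== Notes on version B (the rewrite author's own statement) =====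
-- stated objective: simpler
-- what changed: Replaces A's two-phase search (str.find for a full occurrence, then a descending overlap loop with endswith on marker prefixes) by a single forward scan for the earliest split point p whose tail buffer[p:] either starts with the marker or is a prefix of it.
import Mathlib
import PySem

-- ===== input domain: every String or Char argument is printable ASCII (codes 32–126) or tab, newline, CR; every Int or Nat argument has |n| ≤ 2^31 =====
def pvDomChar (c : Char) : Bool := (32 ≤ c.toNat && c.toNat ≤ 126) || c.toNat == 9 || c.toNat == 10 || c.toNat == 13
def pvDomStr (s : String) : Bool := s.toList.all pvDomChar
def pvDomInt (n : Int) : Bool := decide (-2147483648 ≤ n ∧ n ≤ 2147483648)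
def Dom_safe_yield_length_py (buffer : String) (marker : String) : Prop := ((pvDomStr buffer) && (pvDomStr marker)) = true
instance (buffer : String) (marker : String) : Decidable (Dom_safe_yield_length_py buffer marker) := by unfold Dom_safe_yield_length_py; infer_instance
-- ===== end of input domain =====

-- B replaces A's find-then-descending-overlap search by a single forward scan for the
-- earliest split point whose tail is aligned with the marker (objective: simpler).


-- ===== PORT A =====
-- the 'for i in range(max_overlap, 0, -1)' loop with early return: descending structural
-- recursion on i, returning the first i (largest) with buffer.endswith(marker[:i])
def pvAOverlapLoop (bs ms : List Char) : Nat → Option Nat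
  | 0 => none
  | i + 1 =>
    if PySem.Chars.endswith bs (PySem.Chars.slice ms none (some ((i + 1 : Nat) : Int))) then
      some (i + 1)
    else pvAOverlapLoop bs ms i

def safe_yield_length_py (buffer : String) (marker : String) : Int :=
  let marker_pos := PySem.Str.find buffer marker
  if marker_pos ≠ -1 then marker_pos
  else
    -- max_overlap = min(len(marker) - 1, len(buffer)); Nat subtraction: when marker = ""
    -- this branch is unreachable (find "" = 0), and range(0,0,-1) = range(-1,0,-1) = []
    let max_overlap := min (PySem.Str.len marker - 1) (PySem.Str.len buffer)
    -- range(max_overlap, 0, -1) is empty for max_overlap ≤ 0, as is the loop on .toNat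
    match pvAOverlapLoop buffer.toList marker.toList max_overlap.toNat with
    | some i => PySem.Str.len buffer - i
    | none => PySem.Str.len buffer

-- ===== PORT B =====
-- 'for p in range(len(buffer)): tail = buffer[p:] …' : structural recursion peeling the
-- tail one char per step while counting p up
def pvAltGo (ms : List Char) : Nat → List Char → Nat
  | p, [] => p
  | p, c :: t =>
    if PySem.Chars.startswith (c :: t) ms || PySem.Chars.startswith ms (c :: t) then p
    else pvAltGo ms (p + 1) t

def safe_yield_length_py_alt (buffer : String) (marker : String) : Int :=
  (pvAltGo marker.toList 0 buffer.toList : Int)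

-- ===== PRECONDITION & SPEC =====
def Spec_safe_yield_length_py (buffer : String) (marker : String) (out : Int) : Prop := out = safe_yield_length_py_alt buffer marker
instance (buffer : String) (marker : String) (out : Int) : Decidable (Spec_safe_yield_length_py buffer marker out) := by unfold Spec_safe_yield_length_py; infer_instance

-- ===== CLAIM (what is proved, stated in full; the proofs are below) =====
def Claim_equal_safe_yield_length_py : Prop := ∀ (buffer : String) (marker : String), Dom_safe_yield_length_py buffer marker → Spec_safe_yield_length_py buffer marker (safe_yield_length_py buffer marker)

-- ===== LEMMAS AND PROOFS =====

-- the alignment condition B tests at split point p (on the tail)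
def pvCond (ms tail : List Char) : Prop := ms <+: tail ∨ tail <+: ms

lemma pvCond_nil (ms : List Char) : pvCond ms [] := Or.inr (List.nil_prefix)

lemma pvAltGo_cond (ms tail : List Char) (p : Nat) (h : pvCond ms tail) :
    pvAltGo ms p tail = p := by
  cases tail with
  | nil => rfl
  | cons c t =>
    simp only [pvAltGo]
    rw [if_pos]
    simp only [Bool.or_eq_true, PySem.Chars.startswith_iff]
    rcases h with h | h
    · exact Or.inl h
    · exact Or.inr h

lemma pvAltGo_eq (ms : List Char) (tail : List Char) (p k : Nat)
    (hk : pvCond ms (tail.drop k)) (hmin : ∀ j < k, ¬ pvCond ms (tail.drop j)) :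
    pvAltGo ms p tail = p + k := by
  induction tail generalizing p k with
  | nil =>
    have : k = 0 := by
      by_contra h
      exact hmin 0 (Nat.pos_of_ne_zero h) (pvCond_nil ms)
    simp [this, pvAltGo]
  | cons c t ih =>
    cases k with
    | zero => simpa using pvAltGo_cond ms (c :: t) p hk
    | succ k' =>
      have hnc : ¬ pvCond ms (c :: t) := by simpa using hmin 0 (Nat.succ_pos _)
      have : pvAltGo ms p (c :: t) = pvAltGo ms (p + 1) t := by
        simp only [pvAltGo]
        rw [if_neg]
        simp only [Bool.or_eq_true, PySem.Chars.startswith_iff]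
        rintro (h | h)
        · exact hnc (Or.inl h)
        · exact hnc (Or.inr h)
      rw [this, ih (p + 1) k' (by simpa using hk)
        (fun j hj => by simpa using hmin (j + 1) (by omega))]
      omega

-- a prefix of ms found at some drop of bs is an occurrence of ms inside bs
lemma pvPrefix_drop_infix (ms bs : List Char) (j : Nat) (h : ms <+: bs.drop j) :
    ms <:+: bs :=
  h.isInfix.trans (bs.drop_suffix j).isInfix

-- when ms occurs nowhere in bs, the right disjunct of pvCond at j < bs.length forces
-- bs.drop j to be a PROPER prefix of ms
lemma pvNoOcc_cond (ms bs : List Char) (hno : ¬ ms <:+: bs) (j : Nat)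
    (_hj : j < bs.length) (hc : pvCond ms (bs.drop j)) :
    bs.drop j <+: ms ∧ bs.length - j < ms.length := by
  rcases hc with h | h
  · exact absurd (pvPrefix_drop_infix ms bs j h) hno
  · refine ⟨h, ?_⟩
    have hlen : (bs.drop j).length ≤ ms.length := h.length_le
    simp only [List.length_drop] at hlen
    rcases Nat.lt_or_ge (bs.length - j) ms.length with h' | h'
    · exact h'
    · exfalso
      have heq : bs.drop j = ms := by
        have : (bs.drop j).length = ms.length := by simp; omega
        exact List.IsPrefix.eq_of_length h this
      exact hno (pvPrefix_drop_infix ms bs j (heq ▸ List.prefix_refl ms))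

-- spec of A's descending loop
lemma pvAOverlapLoop_some (bs ms : List Char) (i i0 : Nat)
    (h : pvAOverlapLoop bs ms i = some i0) :
    ms.take i0 <:+ bs ∧ 1 ≤ i0 ∧ i0 ≤ i ∧
      ∀ i', i0 < i' → i' ≤ i → ¬ ms.take i' <:+ bs := by
  induction i with
  | zero => simp [pvAOverlapLoop] at h
  | succ i ih =>
    simp only [pvAOverlapLoop] at h
    simp only [PySem.Chars.endswith_iff, PySem.Chars.slice_eq_listSlice,
      PySem.List.slice_to_natCast] at h
    split_ifs at h with hc
    · obtain rfl : i0 = i + 1 := by injection h with h; omega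
      exact ⟨hc, by omega, le_refl _, fun i' h1 h2 => by omega⟩
    · obtain ⟨h1, h2, h3, h4⟩ := ih h
      refine ⟨h1, h2, by omega, fun i' hi1 hi2 => ?_⟩
      rcases Nat.lt_or_ge i' (i + 1) with h' | h'
      · exact h4 i' hi1 (by omega)
      · have : i' = i + 1 := by omega
        subst this
        exact hc

lemma pvAOverlapLoop_none (bs ms : List Char) (i : Nat)
    (h : pvAOverlapLoop bs ms i = none) :
    ∀ i', 1 ≤ i' → i' ≤ i → ¬ ms.take i' <:+ bs := by
  induction i with
  | zero => intro i' h1 h2; omega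
  | succ i ih =>
    simp only [pvAOverlapLoop] at h
    simp only [PySem.Chars.endswith_iff, PySem.Chars.slice_eq_listSlice,
      PySem.List.slice_to_natCast] at h
    split_ifs at h with hc
    intro i' h1 h2
    rcases Nat.lt_or_ge i' (i + 1) with h' | h'
    · exact ih h i' h1 (by omega)
    · have : i' = i + 1 := by omega
      subst this
      exact hc

-- a suffix of bs of length i equals bs.drop (bs.length - i)
lemma pvSuffix_eq_drop (l bs : List Char) (h : l <:+ bs) :
    bs.drop (bs.length - l.length) = l := by
  obtain ⟨t, rfl⟩ := h
  have hl : (t ++ l).length - l.length = t.length := by simp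
  rw [hl, List.drop_left]

-- ===== VERDICT (by name: the statement is the Claim_ definition above) =====
theorem safe_yield_length_py_spec : Claim_equal_safe_yield_length_py := by
  intro buffer marker _
  unfold Spec_safe_yield_length_py safe_yield_length_py safe_yield_length_py_alt
  simp only [PySem.Str.find_eq, PySem.Str.len_eq]
  generalize buffer.toList = bs
  generalize marker.toList = ms
  by_cases hf : PySem.Chars.find bs ms = -1
  · -- no occurrence of the marker
    rw [if_neg (by simp [hf])]
    have hno : ¬ ms <:+: bs := (PySem.Chars.find_eq_neg_one_iff bs ms).1 hf
    have hm0 : 1 ≤ ms.length := by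
      rcases Nat.eq_zero_or_pos ms.length with h0 | h0
      · exfalso
        have : ms = [] := List.length_eq_zero_iff.1 h0
        rw [this, PySem.Chars.find_nil] at hf
        omega
      · exact h0
    have hM : (min ((ms.length : Int) - 1) (bs.length : Int)).toNat
        = min (ms.length - 1) bs.length := by omega
    rcases hLoop : pvAOverlapLoop bs ms
        ((min ((ms.length : Int) - 1) (bs.length : Int)).toNat) with _ | i0
    · -- loop found nothing: A returns len(buffer); B stops only at bs.length
      rw [hM] at hLoop
      have hB : pvAltGo ms 0 bs = bs.length := by
        have := pvAltGo_eq ms bs 0 bs.length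
          (by simpa [List.drop_length] using pvCond_nil ms) ?_
        · omega
        intro j hj hc
        obtain ⟨hpre, hlt⟩ := pvNoOcc_cond ms bs hno j hj hc
        have htake : bs.drop j = ms.take (bs.length - j) := by
          have := List.prefix_iff_eq_take.1 hpre
          simpa using this
        exact pvAOverlapLoop_none bs ms _ hLoop (bs.length - j) (by omega)
          (by omega) (htake ▸ (bs.drop_suffix j))
      rw [hB]
    · -- loop found overlap i0: A returns len(buffer) - i0
      rw [hM] at hLoop
      obtain ⟨hsuf, h1, hle, hmax⟩ := pvAOverlapLoop_some bs ms _ i0 hLoop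
      have hi0m : i0 ≤ ms.length - 1 := le_trans hle (Nat.min_le_left _ _)
      have hi0n : i0 ≤ bs.length := le_trans hle (Nat.min_le_right _ _)
      have hlen : (ms.take i0).length = i0 := by simp; omega
      have hdrop : bs.drop (bs.length - i0) = ms.take i0 := by
        have := pvSuffix_eq_drop (ms.take i0) bs hsuf
        rwa [hlen] at this
      have hB : pvAltGo ms 0 bs = bs.length - i0 := by
        have := pvAltGo_eq ms bs 0 (bs.length - i0)
          (Or.inr (hdrop ▸ List.take_prefix i0 ms)) ?_
        · omega
        intro j hj hc
        obtain ⟨hpre, hlt⟩ := pvNoOcc_cond ms bs hno j (by omega) hc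
        have htake : bs.drop j = ms.take (bs.length - j) := by
          have := List.prefix_iff_eq_take.1 hpre
          simpa using this
        exact hmax (bs.length - j) (by omega) (by omega)
          (htake ▸ (bs.drop_suffix j))
      rw [hB]
      show ((bs.length : Int) - i0) = ((bs.length - i0 : Nat) : Int)
      omega
  · -- first occurrence at find bs ms ≥ 0
    rw [if_pos (by simp [hf])]
    have hnn : 0 ≤ PySem.Chars.find bs ms := by
      have := PySem.Chars.neg_one_le_find (s := bs) (sub := ms)
      omega
    obtain ⟨hocc, hfirst⟩ := PySem.Chars.find_spec (s := bs) (sub := ms) hnn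
    have hfle : ms.length ≤ bs.length - (PySem.Chars.find bs ms).toNat := by
      have h1 := hocc.length_le
      have h2 := PySem.Chars.find_le_length (s := bs) (sub := ms)
      simp only [List.length_drop] at h1
      omega
    have hB : pvAltGo ms 0 bs = (PySem.Chars.find bs ms).toNat := by
      have := pvAltGo_eq ms bs 0 (PySem.Chars.find bs ms).toNat (Or.inl hocc) ?_
      · omega
      intro j hj hc
      rcases hc with h | h
      · exact hfirst j hj h
      · have h1 : (bs.drop j).length ≤ ms.length := h.length_le
        have h2 := PySem.Chars.find_le_length (s := bs) (sub := ms)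
        simp only [List.length_drop] at h1
        omega
    rw [hB]
    omega
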